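-- pv_equiv track=rewrite | github.com/Choeseonjeong/Baekjoon | 프로그래머스/0/120845. 주사위의 개수/주사위의 개수.py | solution
-- ===== SOURCE A (Python) =====
-- def solution(box, n):
--     arr = []
--     num = 1
--     for i in box:
--         arr.append(i//n)
--     for i in arr:
--         num *= i
--     return num
-- ===== SOURCE B (Python) =====
-- def solution(box, n):
--     if not box:
--         return 1
--     if len(box) == 1:
--         return box[0] // n
--     mid = len(box) // 2
--     return solution(box[:mid], n) * solution(box[mid:], n)
-- ===== Notes on version B (the rewrite author's own statement) =====
-- stated objective: alternative
-- what changed: Divide-and-conquer recursion: split the box at the midpoint and multiply the two halves' quotient products, instead of A's two staged loops (materialize all floor-divisions into a list, then reduce it).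
import Mathlib
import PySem

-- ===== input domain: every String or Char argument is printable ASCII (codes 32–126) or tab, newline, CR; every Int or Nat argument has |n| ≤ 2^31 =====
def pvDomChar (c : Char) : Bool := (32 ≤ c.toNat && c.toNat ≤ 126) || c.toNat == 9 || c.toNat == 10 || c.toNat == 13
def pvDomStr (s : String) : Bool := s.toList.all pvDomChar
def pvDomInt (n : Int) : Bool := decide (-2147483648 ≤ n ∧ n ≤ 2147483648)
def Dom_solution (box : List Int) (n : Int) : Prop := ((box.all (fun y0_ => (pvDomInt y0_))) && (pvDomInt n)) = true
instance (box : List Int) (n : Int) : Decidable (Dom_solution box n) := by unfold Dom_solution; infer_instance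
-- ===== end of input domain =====

-- B replaces A's two staged loops (build quotient list, then reduce) with a
-- midpoint divide-and-conquer recursion; objective: alternative (same cost).


-- ===== PORT A =====
def solution (box : List Int) (n : Int) : Int :=
  let arr := box.foldl (fun acc i => acc ++ [PySem.Int.floordiv i n]) []
  arr.foldl (fun num i => num * i) 1

-- ===== PORT B =====
-- box[:mid] / box[mid:] with 0 ≤ mid are exactly List.take mid / List.drop mid.
def solution_alt (box : List Int) (n : Int) : Int :=
  match box with
  | [] => 1
  | [x] => PySem.Int.floordiv x n
  | x :: y :: rest =>
      let l := x :: y :: rest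
      let mid := l.length / 2
      solution_alt (l.take mid) n * solution_alt (l.drop mid) n
termination_by box.length
decreasing_by
  · simp; omega
  · simp; omega

-- ===== PRECONDITION & SPEC =====
-- Pre_ excludes nonempty box with n = 0, on which Python's i//n raises ZeroDivisionError.
def Pre_solution (box : List Int) (n : Int) : Prop := box = [] ∨ n ≠ 0
instance (box : List Int) (n : Int) : Decidable (Pre_solution box n) := by unfold Pre_solution; infer_instance
def pvWitness_solution : List Int × Int := ([6, 8, 10], 3)
def Spec_solution (box : List Int) (n : Int) (out : Int) : Prop := out = solution_alt box n
instance (box : List Int) (n : Int) (out : Int) : Decidable (Spec_solution box n out) := by unfold Spec_solution; infer_instance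

-- ===== CLAIM (what is proved, stated in full; the proofs are below) =====
def Claim_equal_solution : Prop := ∀ (box : List Int) (n : Int), Dom_solution box n → Pre_solution box n → Spec_solution box n (solution box n)

-- ===== LEMMAS AND PROOFS =====
-- product of the quotients, the common value of both ports
def qprod (n : Int) (l : List Int) : Int := (l.map (fun i => PySem.Int.floordiv i n)).prod

theorem solution_eq_qprod (box : List Int) (n : Int) : solution box n = qprod n box := by
  unfold solution
  have h : ∀ (l acc : List Int),
      l.foldl (fun acc i => acc ++ [PySem.Int.floordiv i n]) acc
        = acc ++ l.map (fun i => PySem.Int.floordiv i n) := by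
    intro l
    induction l with
    | nil => simp
    | cons x xs ih => intro acc; simp [ih]
  have h2 : ∀ (l : List Int) (a : Int), l.foldl (fun num i => num * i) a = a * l.prod := by
    intro l
    induction l with
    | nil => simp
    | cons x xs ih => intro a; simp [ih, mul_assoc]
  simp [h, h2, qprod]

theorem solution_alt_eq_qprod (n : Int) :
    ∀ (k : Nat) (box : List Int), box.length ≤ k → solution_alt box n = qprod n box := by
  intro k
  induction k with
  | zero =>
    intro box hb
    have : box = [] := by cases box <;> simp_all
    subst this; simp [solution_alt, qprod]
  | succ k ih =>
    intro box hb
    match box with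
    | [] => simp [solution_alt, qprod]
    | [x] => simp [solution_alt, qprod]
    | a :: b :: rest =>
      rw [solution_alt]
      have hlen : (a :: b :: rest).length ≥ 2 := by simp
      set l := a :: b :: rest with hl
      have hmid1 : 1 ≤ l.length / 2 := by omega
      have hmid2 : l.length / 2 < l.length := by omega
      rw [ih (l.take (l.length / 2)) (by simp; omega),
          ih (l.drop (l.length / 2)) (by simp; omega)]
      unfold qprod
      rw [← List.prod_append, ← List.map_append, List.take_append_drop]

-- ===== VERDICT (by name: the statement is the Claim_ definition above) =====
theorem solution_spec : Claim_equal_solution := by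
  intro box n _ _
  unfold Spec_solution
  rw [solution_eq_qprod, solution_alt_eq_qprod n box.length box le_rfl]
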